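-- pv_equiv track=rewrite | github.com/alexvesey/cameo-mcp-bridge | mcp-server/cameo_mcp/rubric_workflows.py | _comparison_status
-- ===== SOURCE A (Python) =====
-- from typing import Any, Mapping, Sequence
--
-- def _comparison_status(reasons: Sequence[str]) -> str:
--     if not reasons:
--         return "match"
--     if any("missing" in reason for reason in reasons):
--         return "missing"
--     if any("kind" in reason for reason in reasons):
--         return "kind_mismatch"
--     if any("name" in reason for reason in reasons):
--         return "name_mismatch"
--     if any("parent" in reason for reason in reasons):
--         return "parent_mismatch"
--     if any("stereotype" in reason for reason in reasons):
--         return "stereotype_mismatch"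
--     if any("property" in reason for reason in reasons):
--         return "property_mismatch"
--     return "mismatch"
-- ===== SOURCE B (Python) =====
-- _KEYWORDS = ["missing", "kind", "name", "parent", "stereotype", "property"]
-- _STATUSES = ["missing", "kind_mismatch", "name_mismatch", "parent_mismatch",
--              "stereotype_mismatch", "property_mismatch", "mismatch"]
--
-- def _comparison_status(reasons):
--     if not reasons:
--         return "match"
--     # running minimum of the priority index; the inner search only looks at
--     # priorities better than the current best, and stops once 0 is reached
--     best = 6
--     for reason in reasons:
--         for i in range(best):
--             if _KEYWORDS[i] in reason:
--                 best = i
--                 break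
--         if best == 0:
--             break
--     return _STATUSES[best]
-- ===== Notes on version B (the rewrite author's own statement) =====
-- stated objective: alternative
-- what changed: Replaced six staged any()-scans by a single pass over reasons that maintains a running minimum priority index, with the inner keyword search narrowed to indices below the current best and an early exit once priority 0 is found; the answer is a table lookup at the final index.
import Mathlib
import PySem

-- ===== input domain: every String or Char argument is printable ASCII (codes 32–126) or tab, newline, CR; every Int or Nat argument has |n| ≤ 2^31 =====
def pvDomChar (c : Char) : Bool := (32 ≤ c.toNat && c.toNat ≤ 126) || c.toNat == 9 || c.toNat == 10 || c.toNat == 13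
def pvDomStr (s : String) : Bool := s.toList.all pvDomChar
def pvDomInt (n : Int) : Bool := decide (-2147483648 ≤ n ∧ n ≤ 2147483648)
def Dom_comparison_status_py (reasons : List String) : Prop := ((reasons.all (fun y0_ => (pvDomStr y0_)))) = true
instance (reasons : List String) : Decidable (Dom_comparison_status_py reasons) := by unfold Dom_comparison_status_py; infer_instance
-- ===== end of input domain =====

-- B replaces A's six staged any()-scans by one pass keeping a running minimum
-- priority index (narrowing inner search, early exit), then a table lookup (objective: alternative).


-- ===== PORT A =====
def comparison_status_py (reasons : List String) : String :=
  if reasons = [] then "match"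
  else if reasons.any (fun reason => PySem.Str.isIn "missing" reason) then "missing"
  else if reasons.any (fun reason => PySem.Str.isIn "kind" reason) then "kind_mismatch"
  else if reasons.any (fun reason => PySem.Str.isIn "name" reason) then "name_mismatch"
  else if reasons.any (fun reason => PySem.Str.isIn "parent" reason) then "parent_mismatch"
  else if reasons.any (fun reason => PySem.Str.isIn "stereotype" reason) then "stereotype_mismatch"
  else if reasons.any (fun reason => PySem.Str.isIn "property" reason) then "property_mismatch"
  else "mismatch"

-- ===== PORT B =====
def pvKeywords : List String :=
  ["missing", "kind", "name", "parent", "stereotype", "property"]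
def pvStatuses : List String :=
  ["missing", "kind_mismatch", "name_mismatch", "parent_mismatch",
   "stereotype_mismatch", "property_mismatch", "mismatch"]

-- inner loop: 'for i in range(best): if _KEYWORDS[i] in reason: best = i; break'
def pvInner (reason : String) (best : Nat) (i : Nat) : Nat :=
  if i < best then
    if PySem.Str.isIn (pvKeywords.getD i "") reason then i
    else pvInner reason best (i + 1)
  else best
termination_by best - i

-- outer loop over reasons with the 'if best == 0: break' early exit
def pvOuter (reasons : List String) (best : Nat) : Nat :=
  match reasons with
  | [] => best
  | r :: rs =>
    let b := pvInner r best 0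
    if b = 0 then b else pvOuter rs b

def comparison_status_py_alt (reasons : List String) : String :=
  if reasons = [] then "match"
  else pvStatuses.getD (pvOuter reasons 6) "mismatch"

-- ===== PRECONDITION & SPEC =====
def Spec_comparison_status_py (reasons : List String) (out : String) : Prop := out = comparison_status_py_alt reasons
instance (reasons : List String) (out : String) : Decidable (Spec_comparison_status_py reasons out) := by unfold Spec_comparison_status_py; infer_instance

-- ===== CLAIM (what is proved, stated in full; the proofs are below) =====
def Claim_equal_comparison_status_py : Prop := ∀ (reasons : List String), Dom_comparison_status_py reasons → Spec_comparison_status_py reasons (comparison_status_py reasons)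

-- ===== LEMMAS AND PROOFS =====

-- first keyword index matched by a reason (6 if none)
def pvFirst (r : String) : Nat := pvInner r 6 0

-- minimum of pvFirst over the list (6 on [])
def pvMFold (reasons : List String) : Nat :=
  reasons.foldr (fun r acc => min (pvFirst r) acc) 6

lemma pvFirst_eq (r : String) : pvFirst r =
    (if PySem.Str.isIn "missing" r then 0
    else if PySem.Str.isIn "kind" r then 1
    else if PySem.Str.isIn "name" r then 2
    else if PySem.Str.isIn "parent" r then 3
    else if PySem.Str.isIn "stereotype" r then 4
    else if PySem.Str.isIn "property" r then 5
    else 6) := by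
  unfold pvFirst
  rw [pvInner, pvInner, pvInner, pvInner, pvInner, pvInner, pvInner]
  norm_num [pvKeywords]
  split_ifs <;> rfl

lemma pvInner_ge (r : String) (b : Nat) : ∀ n i, b - i = n → i ≤ b → i ≤ pvInner r b i := by
  intro n
  induction n with
  | zero => intro i h hib; rw [pvInner]; split_ifs with h1 <;> omega
  | succ m ih =>
    intro i h hib
    rw [pvInner]
    split_ifs with h1 h2
    · omega
    · exact le_trans (Nat.le_succ i) (ih (i+1) (by omega) (by omega))
    · omega

lemma pvInner_min (r : String) : ∀ n best i, best - i = n → i ≤ best → best ≤ 6 →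
    pvInner r best i = min best (pvInner r 6 i) := by
  intro n
  induction n with
  | zero =>
    intro best i h hib h6
    have hbi : best = i := by omega
    subst hbi
    rw [pvInner]
    simp only [lt_irrefl, if_false]
    have := pvInner_ge r 6 (6 - best) best rfl (by omega)
    omega
  | succ m ih =>
    intro best i h hib h6
    have h1 : i < best := by omega
    have h2 : i < 6 := by omega
    conv_lhs => rw [pvInner]
    conv_rhs => rw [pvInner]
    rw [if_pos h1, if_pos h2]
    by_cases hm : PySem.Str.isIn (pvKeywords.getD i "") r = true
    · rw [if_pos hm, if_pos hm]; omega
    · rw [if_neg hm, if_neg hm]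
      exact ih best (i+1) (by omega) (by omega) h6

lemma pvInner_eq (r : String) (best : Nat) (h : best ≤ 6) :
    pvInner r best 0 = min best (pvFirst r) :=
  pvInner_min r best best 0 rfl (Nat.zero_le _) h

lemma pvMFold_le (reasons : List String) : pvMFold reasons ≤ 6 := by
  induction reasons with
  | nil => simp [pvMFold]
  | cons r rs ih =>
    have : pvMFold (r :: rs) = min (pvFirst r) (pvMFold rs) := rfl
    omega

lemma pvOuter_eq (reasons : List String) : ∀ best, best ≤ 6 →
    pvOuter reasons best = min best (pvMFold reasons) := by
  induction reasons with
  | nil => intro best h; simp only [pvOuter, pvMFold, List.foldr]; omega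
  | cons r rs ih =>
    intro best h
    have hb : min best (pvFirst r) ≤ 6 := le_trans (Nat.min_le_left _ _) h
    simp only [pvOuter, pvInner_eq r best h]
    have hm : pvMFold (r :: rs) = min (pvFirst r) (pvMFold rs) := rfl
    by_cases h0 : min best (pvFirst r) = 0
    · rw [if_pos h0, hm]; omega
    · rw [if_neg h0, ih _ hb, hm]; omega

lemma pvMFold_le_of_mem (rs : List String) (r : String) (h : r ∈ rs) :
    pvMFold rs ≤ pvFirst r := by
  induction rs with
  | nil => cases h
  | cons x xs ih =>
    have hm : pvMFold (x :: xs) = min (pvFirst x) (pvMFold xs) := rfl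
    rcases List.mem_cons.mp h with rfl | h'
    · omega
    · have := ih h'; omega

lemma pvMFold_ge (rs : List String) (k : Nat) (hk : k ≤ 6) (h : ∀ r ∈ rs, k ≤ pvFirst r) :
    k ≤ pvMFold rs := by
  induction rs with
  | nil => have hm : pvMFold [] = 6 := rfl; omega
  | cons x xs ih =>
    have hm : pvMFold (x :: xs) = min (pvFirst x) (pvMFold xs) := rfl
    have h1 := h x (List.mem_cons_self)
    have h2 := ih (fun r hr => h r (List.mem_cons_of_mem x hr))
    omega

-- bounds on pvFirst from individual keyword facts
lemma pvU0 (r : String) (h : PySem.Str.isIn "missing" r = true) : pvFirst r ≤ 0 := by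
  rw [pvFirst_eq, if_pos h]
lemma pvU1 (r : String) (h : PySem.Str.isIn "kind" r = true) : pvFirst r ≤ 1 := by
  rw [pvFirst_eq]; split_ifs <;> first | omega | exact absurd h (by assumption)
lemma pvU2 (r : String) (h : PySem.Str.isIn "name" r = true) : pvFirst r ≤ 2 := by
  rw [pvFirst_eq]; split_ifs <;> first | omega | exact absurd h (by assumption)
lemma pvU3 (r : String) (h : PySem.Str.isIn "parent" r = true) : pvFirst r ≤ 3 := by
  rw [pvFirst_eq]; split_ifs <;> first | omega | exact absurd h (by assumption)
lemma pvU4 (r : String) (h : PySem.Str.isIn "stereotype" r = true) : pvFirst r ≤ 4 := by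
  rw [pvFirst_eq]; split_ifs <;> first | omega | exact absurd h (by assumption)
lemma pvU5 (r : String) (h : PySem.Str.isIn "property" r = true) : pvFirst r ≤ 5 := by
  rw [pvFirst_eq]; split_ifs <;> first | omega | exact absurd h (by assumption)

lemma pvLow (r : String) (k : Nat) (hk : k ≤ 6)
    (h0 : 1 ≤ k → PySem.Str.isIn "missing" r = false)
    (h1 : 2 ≤ k → PySem.Str.isIn "kind" r = false)
    (h2 : 3 ≤ k → PySem.Str.isIn "name" r = false)
    (h3 : 4 ≤ k → PySem.Str.isIn "parent" r = false)
    (h4 : 5 ≤ k → PySem.Str.isIn "stereotype" r = false)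
    (h5 : 6 ≤ k → PySem.Str.isIn "property" r = false) :
    k ≤ pvFirst r := by
  rw [pvFirst_eq]
  split_ifs with g0 g1 g2 g3 g4 g5
  · rcases Nat.lt_or_ge k 1 with h | h
    · omega
    · rw [h0 h] at g0; cases g0
  · rcases Nat.lt_or_ge k 2 with h | h
    · omega
    · rw [h1 h] at g1; cases g1
  · rcases Nat.lt_or_ge k 3 with h | h
    · omega
    · rw [h2 h] at g2; cases g2
  · rcases Nat.lt_or_ge k 4 with h | h
    · omega
    · rw [h3 h] at g3; cases g3
  · rcases Nat.lt_or_ge k 5 with h | h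
    · omega
    · rw [h4 h] at g4; cases g4
  · rcases Nat.lt_or_ge k 6 with h | h
    · omega
    · rw [h5 h] at g5; cases g5
  · omega

-- ===== VERDICT (by name: the statement is the Claim_ definition above) =====
theorem comparison_status_py_spec : Claim_equal_comparison_status_py := by
  intro reasons _
  unfold Spec_comparison_status_py comparison_status_py comparison_status_py_alt
  by_cases hnil : reasons = []
  · simp [hnil]
  · simp only [hnil, if_false]
    rw [pvOuter_eq reasons 6 (by omega), Nat.min_eq_right (pvMFold_le reasons)]
    cases h1 : reasons.any (fun reason => PySem.Str.isIn "missing" reason) with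
    | true =>
      obtain ⟨r, hr, hin⟩ := List.any_eq_true.mp h1
      have hM : pvMFold reasons = 0 :=
        Nat.le_zero.mp (le_trans (pvMFold_le_of_mem reasons r hr) (pvU0 r hin))
      simp [hM, pvStatuses]
    | false =>
    have f1 : ∀ r ∈ reasons, PySem.Str.isIn "missing" r = false := by
      simpa using List.any_eq_false.mp h1
    cases h2 : reasons.any (fun reason => PySem.Str.isIn "kind" reason) with
    | true =>
      obtain ⟨r, hr, hin⟩ := List.any_eq_true.mp h2
      have hM : pvMFold reasons = 1 := le_antisymm
        (le_trans (pvMFold_le_of_mem reasons r hr) (pvU1 r hin))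
        (pvMFold_ge reasons 1 (by omega) (fun r hr => pvLow r 1 (by omega)
          (fun _ => f1 r hr) (by omega) (by omega) (by omega) (by omega) (by omega)))
      simp [hM, pvStatuses]
    | false =>
    have f2 : ∀ r ∈ reasons, PySem.Str.isIn "kind" r = false := by
      simpa using List.any_eq_false.mp h2
    cases h3 : reasons.any (fun reason => PySem.Str.isIn "name" reason) with
    | true =>
      obtain ⟨r, hr, hin⟩ := List.any_eq_true.mp h3
      have hM : pvMFold reasons = 2 := le_antisymm
        (le_trans (pvMFold_le_of_mem reasons r hr) (pvU2 r hin))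
        (pvMFold_ge reasons 2 (by omega) (fun r hr => pvLow r 2 (by omega)
          (fun _ => f1 r hr) (fun _ => f2 r hr) (by omega) (by omega) (by omega) (by omega)))
      simp [hM, pvStatuses]
    | false =>
    have f3 : ∀ r ∈ reasons, PySem.Str.isIn "name" r = false := by
      simpa using List.any_eq_false.mp h3
    cases h4 : reasons.any (fun reason => PySem.Str.isIn "parent" reason) with
    | true =>
      obtain ⟨r, hr, hin⟩ := List.any_eq_true.mp h4
      have hM : pvMFold reasons = 3 := le_antisymm
        (le_trans (pvMFold_le_of_mem reasons r hr) (pvU3 r hin))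
        (pvMFold_ge reasons 3 (by omega) (fun r hr => pvLow r 3 (by omega)
          (fun _ => f1 r hr) (fun _ => f2 r hr) (fun _ => f3 r hr) (by omega) (by omega) (by omega)))
      simp [hM, pvStatuses]
    | false =>
    have f4 : ∀ r ∈ reasons, PySem.Str.isIn "parent" r = false := by
      simpa using List.any_eq_false.mp h4
    cases h5 : reasons.any (fun reason => PySem.Str.isIn "stereotype" reason) with
    | true =>
      obtain ⟨r, hr, hin⟩ := List.any_eq_true.mp h5
      have hM : pvMFold reasons = 4 := le_antisymm
        (le_trans (pvMFold_le_of_mem reasons r hr) (pvU4 r hin))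
        (pvMFold_ge reasons 4 (by omega) (fun r hr => pvLow r 4 (by omega)
          (fun _ => f1 r hr) (fun _ => f2 r hr) (fun _ => f3 r hr) (fun _ => f4 r hr) (by omega) (by omega)))
      simp [hM, pvStatuses]
    | false =>
    have f5 : ∀ r ∈ reasons, PySem.Str.isIn "stereotype" r = false := by
      simpa using List.any_eq_false.mp h5
    cases h6 : reasons.any (fun reason => PySem.Str.isIn "property" reason) with
    | true =>
      obtain ⟨r, hr, hin⟩ := List.any_eq_true.mp h6
      have hM : pvMFold reasons = 5 := le_antisymm
        (le_trans (pvMFold_le_of_mem reasons r hr) (pvU5 r hin))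
        (pvMFold_ge reasons 5 (by omega) (fun r hr => pvLow r 5 (by omega)
          (fun _ => f1 r hr) (fun _ => f2 r hr) (fun _ => f3 r hr) (fun _ => f4 r hr) (fun _ => f5 r hr) (by omega)))
      simp [hM, pvStatuses]
    | false =>
      have f6 : ∀ r ∈ reasons, PySem.Str.isIn "property" r = false := by
        simpa using List.any_eq_false.mp h6
      have hM : pvMFold reasons = 6 := le_antisymm (pvMFold_le reasons)
        (pvMFold_ge reasons 6 (by omega) (fun r hr => pvLow r 6 (by omega)
          (fun _ => f1 r hr) (fun _ => f2 r hr) (fun _ => f3 r hr)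
          (fun _ => f4 r hr) (fun _ => f5 r hr) (fun _ => f6 r hr)))
      simp [hM, pvStatuses]
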